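-- pv_equiv track=rewrite | github.com/meytartech/Optimizator | core/score_loader.py | get_score_at_timestamp
-- ===== SOURCE A (Python) =====
-- from typing import List, Dict, Any, Optional
--
-- def get_score_at_timestamp(scores: List[Dict[str, Any]], timestamp: str,
--                            timeframe: Optional[str] = None) -> Optional[Dict[str, Any]]:
--     """Get the most recent score record at or before a given timestamp.
--
--     Args:
--         scores: List of score records (must be sorted by timestamp)
--         timestamp: ISO format timestamp to query
--         timeframe: Optional timeframe filter
--
--     Returns:
--         Score record dict or None if no matching score found
--     """
--     if not scores:
--         return None
--
--     # Filter by timeframe if specified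
--     if timeframe:
--         scores = [s for s in scores if s.get('timeframe') == timeframe]
--
--     # Find most recent score <= timestamp
--     result = None
--     for score in scores:
--         if score['timestamp'] <= timestamp:
--             result = score
--         else:
--             break
--
--     return result
-- ===== SOURCE B (Python) =====
-- from typing import List, Dict, Any, Optional
--
-- def get_score_at_timestamp(scores: List[Dict[str, Any]], timestamp: str,
--                            timeframe: Optional[str] = None) -> Optional[Dict[str, Any]]:
--     """Get the most recent score record at or before a given timestamp.
--
--     Binary search (bisect_right) on the sorted timestamps: lo converges to the
--     number of records with timestamp <= the query, so the answer is the record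
--     just before lo (requires the timestamps to be sorted, as documented).
--     """
--     if not scores:
--         return None
--
--     if timeframe:
--         scores = [s for s in scores if s.get('timeframe') == timeframe]
--
--     lo, hi = 0, len(scores)
--     while lo < hi:
--         mid = (lo + hi) // 2
--         if timestamp < scores[mid]['timestamp']:
--             hi = mid
--         else:
--             lo = mid + 1
--
--     return scores[lo - 1] if lo else None
-- ===== Notes on version B (the rewrite author's own statement) =====
-- stated objective: alternative
-- what changed: B replaces A's linear forward scan with a binary search (bisect_right) over the sorted timestamps, returning the record just before the insertion point.
-- outside the precondition, e.g. on get_score_at_timestamp([{'timestamp': 'b'}, {}], 'a', None): A returns None, B raises KeyError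
import Mathlib
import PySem

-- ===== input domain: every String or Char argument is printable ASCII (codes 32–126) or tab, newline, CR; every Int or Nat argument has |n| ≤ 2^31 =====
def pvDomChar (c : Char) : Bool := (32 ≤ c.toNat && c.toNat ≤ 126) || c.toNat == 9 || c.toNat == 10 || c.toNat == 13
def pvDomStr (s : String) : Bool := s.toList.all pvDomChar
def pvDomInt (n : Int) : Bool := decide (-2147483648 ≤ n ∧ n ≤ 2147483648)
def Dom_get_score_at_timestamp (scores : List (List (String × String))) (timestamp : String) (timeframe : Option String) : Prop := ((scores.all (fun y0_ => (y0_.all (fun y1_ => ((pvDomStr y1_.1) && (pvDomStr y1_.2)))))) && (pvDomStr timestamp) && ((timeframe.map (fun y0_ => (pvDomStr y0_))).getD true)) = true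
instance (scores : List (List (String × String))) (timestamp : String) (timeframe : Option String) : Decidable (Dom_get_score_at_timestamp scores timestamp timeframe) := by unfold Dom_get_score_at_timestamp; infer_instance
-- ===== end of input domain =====

-- B replaces A's linear scan with a binary search (bisect_right) on the sorted timestamps
-- (objective: alternative algorithm, same measured cost).

-- ===== PORT A =====
-- A's for-loop with break, carrying `result`; none at a record without a 'timestamp' key = KeyError (outside Pre_).
def pvA_loop (timestamp : String) (l : List (List (String × String))) (result : Option (List (String × String))) : Option (List (String × String)) :=
  match l with
  | [] => result
  | s :: rest =>
    match (PySem.Dict.mk s).get? "timestamp" with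
    | none => none  -- KeyError
    | some ts => if ts.toList ≤ timestamp.toList then pvA_loop timestamp rest (some s) else result

def get_score_at_timestamp (scores : List (List (String × String))) (timestamp : String) (timeframe : Option String) : Option (List (String × String)) :=
  if scores = [] then none
  else
    let scores' :=
      match timeframe with
      | none => scores
      | some t => if t = "" then scores
                  else scores.filter (fun s => (PySem.Dict.mk s).get? "timeframe" == some t)
    pvA_loop timestamp scores' none

-- ===== PORT B =====
-- record's timestamp; Pre_ guarantees the key is present at every probed record, so getD "" is exact there
def pvTsOf (s : List (String × String)) : String := ((PySem.Dict.mk s).get? "timestamp").getD ""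

-- B's while-loop: bisect_right; `timestamp < scores[mid]['timestamp']` is Python's string comparison
def pvBisectB (l : List (List (String × String))) (timestamp : String) (lo hi : Nat) : Nat :=
  if lo < hi then
    let mid := (lo + hi) / 2
    if timestamp.toList < (pvTsOf (l.getD mid [])).toList then pvBisectB l timestamp lo mid
    else pvBisectB l timestamp (mid + 1) hi
  else lo
termination_by hi - lo
decreasing_by all_goals omega

def get_score_at_timestamp_alt (scores : List (List (String × String))) (timestamp : String) (timeframe : Option String) : Option (List (String × String)) :=
  if scores = [] then none
  else
    let l :=
      match timeframe with
      | none => scores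
      | some t => if t = "" then scores
                  else scores.filter (fun s => (PySem.Dict.mk s).get? "timeframe" == some t)
    let lo := pvBisectB l timestamp 0 l.length
    if 0 < lo then PySem.List.pyGet? l ((lo : Int) - 1) else none

-- ===== PRECONDITION & SPEC =====
-- the timeframe-filtered list both programs work on
def pvFiltered (scores : List (List (String × String))) (timeframe : Option String) : List (List (String × String)) :=
  match timeframe with
  | none => scores
  | some t => if t = "" then scores
              else scores.filter (fun s => (PySem.Dict.mk s).get? "timeframe" == some t)

def pvHasTs (s : List (String × String)) : Bool := ((PySem.Dict.mk s).get? "timestamp").isSome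

-- Pre_ requires what A's docstring demands ("must be sorted by timestamp"): every timeframe-filtered
-- record carries a 'timestamp' key and their timestamps are non-decreasing.  This excludes (a) the
-- KeyError inputs of both programs, and (b) unsorted/key-missing-after-break inputs A still returns
-- on, where A's prefix-scan value is an artefact of its implementation (see cites in claim.json).
def Pre_get_score_at_timestamp (scores : List (List (String × String))) (timestamp : String) (timeframe : Option String) : Prop :=
  (∀ s ∈ pvFiltered scores timeframe, pvHasTs s = true) ∧
  List.Pairwise (fun a b => (pvTsOf a).toList ≤ (pvTsOf b).toList) (pvFiltered scores timeframe)
instance (scores : List (List (String × String))) (timestamp : String) (timeframe : Option String) : Decidable (Pre_get_score_at_timestamp scores timestamp timeframe) := by unfold Pre_get_score_at_timestamp; infer_instance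

def pvWitness_get_score_at_timestamp : (List (List (String × String))) × String × Option String :=
  ([[("timestamp", "2024-01-01")], [("timestamp", "2024-06-01")]], "2024-03-01", none)

def Spec_get_score_at_timestamp (scores : List (List (String × String))) (timestamp : String) (timeframe : Option String) (out : Option (List (String × String))) : Prop := out = get_score_at_timestamp_alt scores timestamp timeframe
instance (scores : List (List (String × String))) (timestamp : String) (timeframe : Option String) (out : Option (List (String × String))) : Decidable (Spec_get_score_at_timestamp scores timestamp timeframe out) := by unfold Spec_get_score_at_timestamp; infer_instance

-- ===== CLAIM (what is proved, stated in full; the proofs are below) =====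
def Claim_equal_get_score_at_timestamp : Prop := ∀ (scores : List (List (String × String))) (timestamp : String) (timeframe : Option String), Dom_get_score_at_timestamp scores timestamp timeframe → Pre_get_score_at_timestamp scores timestamp timeframe → Spec_get_score_at_timestamp scores timestamp timeframe (get_score_at_timestamp scores timestamp timeframe)

-- ===== LEMMAS AND PROOFS =====

-- the qualifying leading run both programs' answers are characterised by
def pvRun (timestamp : String) (l : List (List (String × String))) : Nat :=
  (l.takeWhile (fun s => decide ((pvTsOf s).toList ≤ timestamp.toList))).length

-- A's accumulator scan = "index back by the leading-run length" whenever every record has the key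
lemma pvA_loop_eq_run (timestamp : String) (l : List (List (String × String)))
    (hk : ∀ s ∈ l, pvHasTs s = true) (acc : Option (List (String × String))) :
    pvA_loop timestamp l acc =
      if 0 < pvRun timestamp l then PySem.List.pyGet? l ((pvRun timestamp l : Int) - 1) else acc := by
  induction l generalizing acc with
  | nil => simp [pvA_loop, pvRun]
  | cons s rest ih =>
    have hks : pvHasTs s = true := hk s (by simp)
    obtain ⟨ts, hts⟩ : ∃ ts, (PySem.Dict.mk s).get? "timestamp" = some ts := by
      unfold pvHasTs at hks; cases h : (PySem.Dict.mk s).get? "timestamp" <;> simp_all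
    have htsOf : pvTsOf s = ts := by simp [pvTsOf, hts]
    simp only [pvA_loop, hts]
    by_cases hle : ts.toList ≤ timestamp.toList
    · rw [if_pos hle, ih (fun x hx => hk x (by simp [hx]))]
      have hrun : pvRun timestamp (s :: rest) = pvRun timestamp rest + 1 := by
        simp [pvRun, List.takeWhile, htsOf, hle]
      rw [hrun]
      cases hr : pvRun timestamp rest with
      | zero => simp [PySem.List.pyGet?, PySem.List.pyIdx?]
      | succ k =>
        have h1 : ((k + 1 + 1 : Nat) : Int) - 1 = ((k + 1 : Nat) : Int) := by push_cast; ring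
        have h2 : ((k + 1 : Nat) : Int) - 1 = ((k : Nat) : Int) := by push_cast; ring
        simp only [h1, h2, PySem.List.pyGet?_natCast]
        simp
    · rw [if_neg hle]
      have hrun : pvRun timestamp (s :: rest) = 0 := by
        simp [pvRun, List.takeWhile, htsOf, hle]
      simp [hrun]

-- elements inside the leading run satisfy the predicate
lemma run_holds {α} (d : α) (p : α → Bool) (l : List α) :
    ∀ i < (l.takeWhile p).length, p (l.getD i d) = true := by
  induction l with
  | nil => simp
  | cons x rest ih =>
    intro i hi
    cases hp : p x with
    | false => simp [List.takeWhile, hp] at hi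
    | true =>
      simp only [List.takeWhile, hp] at hi ⊢
      cases i with
      | zero => simpa using hp
      | succ j => exact ih j (by simpa using hi)

-- the element right after the leading run fails the predicate
lemma run_fails {α} (d : α) (p : α → Bool) (l : List α)
    (h : (l.takeWhile p).length < l.length) :
    p (l.getD (l.takeWhile p).length d) = false := by
  induction l with
  | nil => simp at h
  | cons x rest ih =>
    cases hp : p x with
    | false => simp [List.takeWhile, hp]
    | true =>
      simp only [List.takeWhile, hp, List.length_cons] at h ⊢
      exact ih (by omega)

-- sortedness turns the run length r into a full characterisation: index i qualifies iff i < r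
lemma run_char (timestamp : String) (l : List (List (String × String)))
    (hs : List.Pairwise (fun a b => (pvTsOf a).toList ≤ (pvTsOf b).toList) l) :
    ∀ i < l.length, ((pvTsOf (l.getD i [])).toList ≤ timestamp.toList ↔ i < pvRun timestamp l) := by
  intro i hi
  constructor
  · intro hle
    by_contra hnot
    have hri : pvRun timestamp l ≤ i := Nat.le_of_not_lt hnot
    have hr : pvRun timestamp l < l.length := Nat.lt_of_le_of_lt hri hi
    have hle' : (pvTsOf (l.getD (pvRun timestamp l) [])).toList ≤ timestamp.toList := by
      rcases Nat.eq_or_lt_of_le hri with heq | hlt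
      · rw [heq]; exact hle
      · have hpw := List.pairwise_iff_getElem.mp hs (pvRun timestamp l) i hr hi hlt
        rw [List.getD_eq_getElem l [] hr]
        rw [List.getD_eq_getElem l [] hi] at hle
        exact le_trans hpw hle
    have hfail : (fun s => decide ((pvTsOf s).toList ≤ timestamp.toList))
        (l.getD (pvRun timestamp l) []) = false := run_fails [] _ l hr
    simp only [decide_eq_false_iff_not] at hfail
    exact hfail hle'
  · intro hlt
    have h := run_holds [] (fun s => decide ((pvTsOf s).toList ≤ timestamp.toList)) l i hlt
    simpa using h

-- the binary search converges to any r with the bracket invariant lo ≤ r ≤ hi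
lemma pvBisectB_eq (l : List (List (String × String))) (timestamp : String) (r : Nat)
    (H : ∀ i < l.length, ((pvTsOf (l.getD i [])).toList ≤ timestamp.toList ↔ i < r)) :
    ∀ n lo hi, hi - lo ≤ n → lo ≤ r → r ≤ hi → hi ≤ l.length → pvBisectB l timestamp lo hi = r := by
  intro n
  induction n with
  | zero =>
    intro lo hi hf h1 h2 h3
    rw [pvBisectB, if_neg (by omega)]
    omega
  | succ n ih =>
    intro lo hi hf h1 h2 h3
    by_cases hlt : lo < hi
    · rw [pvBisectB, if_pos hlt]
      have hmid1 : lo ≤ (lo + hi) / 2 := by omega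
      have hmid2 : (lo + hi) / 2 < hi := by omega
      have hHm := H ((lo + hi) / 2) (by omega)
      by_cases hc : timestamp.toList < (pvTsOf (l.getD ((lo + hi) / 2) [])).toList
      · rw [if_pos hc]
        have : ¬ (pvTsOf (l.getD ((lo + hi) / 2) [])).toList ≤ timestamp.toList := not_le.mpr hc
        have hr2 : r ≤ (lo + hi) / 2 := by
          by_contra h; exact this (hHm.mpr (by omega))
        exact ih lo ((lo + hi) / 2) (by omega) h1 hr2 (by omega)
      · rw [if_neg hc]
        have hle : (pvTsOf (l.getD ((lo + hi) / 2) [])).toList ≤ timestamp.toList :=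
          not_lt.mp hc
        have hr1 : (lo + hi) / 2 < r := hHm.mp hle
        exact ih ((lo + hi) / 2 + 1) hi (by omega) (by omega) h2 h3
    · rw [pvBisectB, if_neg hlt]; omega

theorem get_score_at_timestamp_eq (scores : List (List (String × String))) (timestamp : String)
    (timeframe : Option String) (hpre : Pre_get_score_at_timestamp scores timestamp timeframe) :
    get_score_at_timestamp scores timestamp timeframe
      = get_score_at_timestamp_alt scores timestamp timeframe := by
  obtain ⟨hk, hs⟩ := hpre
  have core : ∀ l : List (List (String × String)), (∀ s ∈ l, pvHasTs s = true) →
      List.Pairwise (fun a b => (pvTsOf a).toList ≤ (pvTsOf b).toList) l →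
      pvA_loop timestamp l none =
        (if 0 < pvBisectB l timestamp 0 l.length
         then PySem.List.pyGet? l ((pvBisectB l timestamp 0 l.length : Int) - 1) else none) := by
    intro l hkl hsl
    have hr : pvBisectB l timestamp 0 l.length = pvRun timestamp l := by
      refine pvBisectB_eq l timestamp (pvRun timestamp l) (run_char timestamp l hsl)
        l.length 0 l.length (by omega) (by omega) ?_ (by omega)
      exact (List.takeWhile_sublist _).length_le
    rw [pvA_loop_eq_run timestamp l hkl none, hr]
  unfold get_score_at_timestamp get_score_at_timestamp_alt
  by_cases hempty : scores = []
  · simp [hempty]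
  · simp only [if_neg hempty]
    exact core _ hk hs

-- ===== VERDICT (by name: the statement is the Claim_ definition above) =====
theorem get_score_at_timestamp_spec : Claim_equal_get_score_at_timestamp := by
  intro scores timestamp timeframe _ hpre
  exact get_score_at_timestamp_eq scores timestamp timeframe hpre
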